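-- pv_equiv track=rewrite | github.com/huashan1102/PyUpGuard | extraction/lib_setup_req_extraction.py | split_packname_and_cons
-- ===== SOURCE A (Python) =====
-- def split_packname_and_cons(line):
--     version_ops = [r'<', r'<=', r'!=', r'==', r'>=', r'>', r'~=', r'===']
--     min_op_idx = None
--     for op in version_ops:
--         if line.find(op) != -1:
--             if min_op_idx == None:
--                 min_op_idx = line.find(op)
--             else:
--                 min_op_idx = min(min_op_idx, line.find(op))
--     res = []
--     if min_op_idx != None:
--         res.append(line[:min_op_idx])
--         res.append(line[min_op_idx:])
--     else:
--         res.append(line)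
--     for i in range(len(res)):
--         res[i]=res[i].replace(" ","")
--     return res
-- ===== SOURCE B (Python) =====
-- def split_packname_and_cons(line):
--     idx = None
--     for i in range(len(line)):
--         c = line[i]
--         if c == '<' or c == '>' or (c in '=!~' and i + 1 < len(line) and line[i + 1] == '='):
--             idx = i
--             break
--     res = [line] if idx is None else [line[:idx], line[idx:]]
--     return [s.replace(' ', '') for s in res]
-- ===== Notes on version B (the rewrite author's own statement) =====
-- stated objective: alternative
-- what changed: Replaces A's eight separate str.find scans combined by a running minimum with one single left-to-right scan that stops at the first index whose character is '<' or '>' or whose two-character window is '==', '!=' or '~=' (the longer operators are redundant since they share start positions with these).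
import Mathlib
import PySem

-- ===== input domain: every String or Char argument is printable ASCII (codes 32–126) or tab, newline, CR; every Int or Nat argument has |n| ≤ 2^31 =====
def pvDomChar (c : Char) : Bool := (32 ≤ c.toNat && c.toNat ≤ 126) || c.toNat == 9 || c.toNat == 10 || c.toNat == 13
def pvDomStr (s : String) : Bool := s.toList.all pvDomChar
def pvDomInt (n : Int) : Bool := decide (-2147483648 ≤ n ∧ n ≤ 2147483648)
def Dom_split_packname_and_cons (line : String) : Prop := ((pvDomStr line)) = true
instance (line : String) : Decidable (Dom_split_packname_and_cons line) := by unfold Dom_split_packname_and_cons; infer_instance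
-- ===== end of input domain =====

-- B replaces A's eight separate find() scans by a single left-to-right scan for the
-- first operator start ('<', '>', or a two-char window '==', '!=', '~='); same output.


-- ===== PORT A =====
-- one iteration of A's 'for op in version_ops' loop
def pvFindStep (line : String) (acc : Option Int) (op : String) : Option Int :=
  if PySem.Str.find line op ≠ -1 then
    match acc with
    | none => some (PySem.Str.find line op)
    | some v => some (min v (PySem.Str.find line op))
  else acc

def split_packname_and_cons (line : String) : List String :=
  let version_ops : List String := ["<", "<=", "!=", "==", ">=", ">", "~=", "==="]
  let min_op_idx : Option Int := version_ops.foldl (pvFindStep line) none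
  let res : List String :=
    match min_op_idx with
    | some j => [PySem.Str.slice line none (some j), PySem.Str.slice line (some j) none]
    | none   => [line]
  res.map (fun s => PySem.Str.replace s " " "")

-- ===== PORT B =====
-- B's single scan: first index whose char is '<'/'>' or whose 2-char window is '==', '!=' or '~='
def pvScanOp : List Char → Nat → Option Nat
  | [], _ => none
  | c :: rest, i =>
    if c = '<' ∨ c = '>' then some i
    else if (c = '=' ∨ c = '!' ∨ c = '~') ∧ rest.head? = some '=' then some i
    else pvScanOp rest (i + 1)

def split_packname_and_cons_alt (line : String) : List String :=
  let res : List String :=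
    match pvScanOp line.toList 0 with
    | none   => [line]
    | some i => [PySem.Str.slice line none (some (i : Int)), PySem.Str.slice line (some (i : Int)) none]
  res.map (fun s => PySem.Str.replace s " " "")

-- ===== PRECONDITION & SPEC =====
def Spec_split_packname_and_cons (line : String) (out : List String) : Prop := out = split_packname_and_cons_alt line
instance (line : String) (out : List String) : Decidable (Spec_split_packname_and_cons line out) := by unfold Spec_split_packname_and_cons; infer_instance

-- ===== CLAIM (what is proved, stated in full; the proofs are below) =====
def Claim_equal_split_packname_and_cons : Prop := ∀ (line : String), Dom_split_packname_and_cons line → Spec_split_packname_and_cons line (split_packname_and_cons line)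

-- ===== LEMMAS AND PROOFS =====

-- an operator starts at the head of t
def pvHit (t : List Char) : Prop :=
  ['<'] <+: t ∨ ['>'] <+: t ∨ ['=','='] <+: t ∨ ['!','='] <+: t ∨ ['~','='] <+: t

lemma pvHit_cons (c : Char) (rest : List Char) :
    pvHit (c :: rest) ↔
      ((c = '<' ∨ c = '>') ∨ ((c = '=' ∨ c = '!' ∨ c = '~') ∧ rest.head? = some '=')) := by
  cases rest <;> simp [pvHit, List.cons_prefix_cons] <;> tauto

lemma pvHit_nil : ¬ pvHit [] := by simp [pvHit]

-- every op in A's list witnesses a hit where it prefixes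
lemma pvHit_of_op_prefix (op : String)
    (hop : op ∈ (["<", "<=", "!=", "==", ">=", ">", "~=", "==="] : List String))
    (t : List Char) (h : op.toList <+: t) : pvHit t := by
  unfold pvHit
  simp only [List.mem_cons, List.not_mem_nil, or_false] at hop
  rcases hop with rfl|rfl|rfl|rfl|rfl|rfl|rfl|rfl <;>
    first
      | exact Or.inl h
      | exact Or.inl (List.IsPrefix.trans ⟨['='], rfl⟩ h)
      | exact Or.inr (Or.inl h)
      | exact Or.inr (Or.inl (List.IsPrefix.trans ⟨['='], rfl⟩ h))
      | exact Or.inr (Or.inr (Or.inl h))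
      | exact Or.inr (Or.inr (Or.inl (List.IsPrefix.trans ⟨['='], rfl⟩ h)))
      | exact Or.inr (Or.inr (Or.inr (Or.inl h)))
      | exact Or.inr (Or.inr (Or.inr (Or.inr h)))

-- B's scan: none means no hit anywhere
lemma pvScan_none (cs : List Char) (i : Nat) (h : pvScanOp cs i = none) :
    ∀ k, ¬ pvHit (cs.drop k) := by
  induction cs generalizing i with
  | nil => intro k; simp [pvHit_nil]
  | cons c rest ih =>
    intro k
    unfold pvScanOp at h
    split_ifs at h with h1 h2
    intro hk
    cases k with
    | zero =>
      rw [List.drop_zero, pvHit_cons] at hk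
      tauto
    | succ k => exact ih (i + 1) h k hk

-- B's scan: some j means a hit at j - i and none before
lemma pvScan_some (cs : List Char) (i j : Nat) (h : pvScanOp cs i = some j) :
    i ≤ j ∧ pvHit (cs.drop (j - i)) ∧ ∀ k < j - i, ¬ pvHit (cs.drop k) := by
  induction cs generalizing i with
  | nil => simp [pvScanOp] at h
  | cons c rest ih =>
    unfold pvScanOp at h
    split_ifs at h with h1 h2
    · cases h
      refine ⟨le_rfl, ?_, by omega⟩
      simp only [Nat.sub_self, List.drop_zero, pvHit_cons]; tauto
    · cases h
      refine ⟨le_rfl, ?_, by omega⟩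
      simp only [Nat.sub_self, List.drop_zero, pvHit_cons]; tauto
    · obtain ⟨hij, hhit, hmin⟩ := ih (i + 1) h
      refine ⟨by omega, ?_, ?_⟩
      · have : (c :: rest).drop (j - i) = rest.drop (j - (i + 1)) := by
          have : j - i = (j - (i + 1)) + 1 := by omega
          rw [this]; rfl
        rw [this]; exact hhit
      · intro k hk
        cases k with
        | zero =>
          rw [List.drop_zero, pvHit_cons]
          tauto
        | succ k =>
          have : (c :: rest).drop (k + 1) = rest.drop k := rfl
          rw [this]
          exact hmin k (by omega)

-- A's fold with all finds -1 stays at acc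
lemma pvFold_acc (ops : List String) (line : String) (acc : Option Int)
    (h : ∀ op ∈ ops, PySem.Str.find line op = -1) :
    ops.foldl (pvFindStep line) acc = acc := by
  induction ops generalizing acc with
  | nil => rfl
  | cons op t ih =>
    have h0 := h op (by simp)
    simp only [List.foldl_cons, pvFindStep, h0]
    simp only [ne_eq, not_true_eq_false, if_false]
    exact ih acc (fun o ho => h o (by simp [ho]))

-- lower bound: every find is -1 or ≥ j, acc ≥ j ⇒ result ≥ j
lemma pvFold_ge (ops : List String) (line : String) (j : Int) (acc : Option Int)
    (hops : ∀ op ∈ ops, PySem.Str.find line op = -1 ∨ j ≤ PySem.Str.find line op)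
    (hacc : ∀ v, acc = some v → j ≤ v) :
    ∀ v, ops.foldl (pvFindStep line) acc = some v → j ≤ v := by
  induction ops generalizing acc with
  | nil => exact hacc
  | cons op t ih =>
    intro v hv
    simp only [List.foldl_cons] at hv
    refine ih _ (fun o ho => hops o (by simp [ho])) ?_ v hv
    intro w hw
    unfold pvFindStep at hw
    rcases hops op (by simp) with hm1 | hge
    · rw [hm1] at hw; simp at hw; exact hacc w hw
    split_ifs at hw with hne
    · cases acc with
      | none => cases hw; exact hge
      | some u =>
        cases hw
        exact le_min (hacc u rfl) hge
    · exact hacc w hw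
  
-- upper bound: some find (or acc) is ≤ j ⇒ result is some v ≤ j
lemma pvFold_le (ops : List String) (line : String) (j : Int) (acc : Option Int)
    (hex : (∃ op ∈ ops, PySem.Str.find line op ≠ -1 ∧ PySem.Str.find line op ≤ j)
           ∨ (∃ v, acc = some v ∧ v ≤ j)) :
    ∃ v, ops.foldl (pvFindStep line) acc = some v ∧ v ≤ j := by
  induction ops generalizing acc with
  | nil =>
    rcases hex with ⟨op, hop, _⟩ | ⟨v, hv, hvj⟩
    · simp at hop
    · exact ⟨v, hv, hvj⟩
  | cons op t ih =>
    simp only [List.foldl_cons]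
    rcases hex with ⟨o, ho, hne, hle⟩ | ⟨v, hv, hvj⟩
    · rcases List.mem_cons.mp ho with rfl | hot
      · refine ih _ (Or.inr ?_)
        unfold pvFindStep
        rw [if_pos hne]
        cases acc with
        | none => exact ⟨_, rfl, hle⟩
        | some u => exact ⟨_, rfl, le_trans (min_le_right u _) hle⟩
      · exact ih _ (Or.inl ⟨o, hot, hne, hle⟩)
    · refine ih _ (Or.inr ?_)
      subst hv
      unfold pvFindStep
      split_ifs with hne
      · exact ⟨_, rfl, le_trans (min_le_left v _) hvj⟩
      · exact ⟨v, rfl, hvj⟩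

-- find characterised by first hit position
lemma pvFind_eq_of (cs sub : List Char) (i : Nat)
    (hpre : sub <+: cs.drop i) (hmin : ∀ k < i, ¬ sub <+: cs.drop k) :
    PySem.Chars.find cs sub = (i : Int) := by
  have hin : PySem.Chars.isIn sub cs = true :=
    (PySem.Chars.exists_prefix_drop_iff_isIn sub cs).mp ⟨i, hpre⟩
  have hnn : 0 ≤ PySem.Chars.find cs sub := by
    rw [PySem.Chars.find_nonneg_iff]
    exact (PySem.Chars.isIn_iff_infix sub cs).mp hin
  obtain ⟨hp, hm⟩ := PySem.Chars.find_spec hnn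
  have h1 : ¬ ((PySem.Chars.find cs sub).toNat < i) := fun hlt => hmin _ hlt hp
  have h2 : ¬ (i < (PySem.Chars.find cs sub).toNat) := fun hlt => hm i hlt hpre
  omega

-- the bridging lemma: A's min-of-finds equals B's scan index
lemma pvMin_eq_scan (line : String) :
    (["<", "<=", "!=", "==", ">=", ">", "~=", "==="] : List String).foldl (pvFindStep line) none
      = (pvScanOp line.toList 0).map Int.ofNat := by
  cases hscan : pvScanOp line.toList 0 with
  | none =>
    have hno := pvScan_none line.toList 0 hscan
    rw [Option.map_none]
    refine pvFold_acc _ line none ?_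
    intro op hop
    rw [PySem.Str.find_eq, PySem.Chars.find_eq_neg_one_iff]
    intro hinf
    obtain ⟨k, hk⟩ := (PySem.Chars.exists_prefix_drop_iff_isIn op.toList line.toList).mpr
      ((PySem.Chars.isIn_iff_infix op.toList line.toList).mpr hinf)
    exact hno k (pvHit_of_op_prefix op hop _ hk)
  | some i =>
    obtain ⟨-, hhit, hmin⟩ := pvScan_some line.toList 0 i hscan
    rw [Nat.sub_zero] at hhit
    simp only [Nat.sub_zero] at hmin
    -- per-op lower bound
    have hops : ∀ op ∈ (["<", "<=", "!=", "==", ">=", ">", "~=", "==="] : List String),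
        PySem.Str.find line op = -1 ∨ (i : Int) ≤ PySem.Str.find line op := by
      intro op hop
      rcases eq_or_ne (PySem.Str.find line op) (-1) with h | h
      · exact Or.inl h
      · right
        rw [PySem.Str.find_eq] at h ⊢
        have hnn : 0 ≤ PySem.Chars.find line.toList op.toList := by
          have h1 := PySem.Chars.neg_one_le_find line.toList op.toList
          omega
        obtain ⟨hp, -⟩ := PySem.Chars.find_spec hnn
        have hhit' := pvHit_of_op_prefix op hop _ hp
        have : ¬ ((PySem.Chars.find line.toList op.toList).toNat < i) :=
          fun hlt => hmin _ hlt hhit'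
        omega
    -- witness op with find = i
    have hwit : ∃ op ∈ (["<", "<=", "!=", "==", ">=", ">", "~=", "==="] : List String),
        PySem.Str.find line op = (i : Int) := by
      have hmin' : ∀ (sub : List Char), (∀ t, sub <+: t → pvHit t) →
          ∀ k < i, ¬ sub <+: line.toList.drop k :=
        fun sub hs k hk hp => hmin k hk (hs _ hp)
      rcases hhit with h | h | h | h | h
      · exact ⟨"<", by simp, by
          rw [PySem.Str.find_eq]
          exact pvFind_eq_of _ _ i h (hmin' _ (fun t ht => Or.inl ht))⟩
      · exact ⟨">", by simp, by
          rw [PySem.Str.find_eq]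
          exact pvFind_eq_of _ _ i h (hmin' _ (fun t ht => Or.inr (Or.inl ht)))⟩
      · exact ⟨"==", by simp, by
          rw [PySem.Str.find_eq]
          exact pvFind_eq_of _ _ i h (hmin' _ (fun t ht => Or.inr (Or.inr (Or.inl ht))))⟩
      · exact ⟨"!=", by simp, by
          rw [PySem.Str.find_eq]
          exact pvFind_eq_of _ _ i h (hmin' _ (fun t ht => Or.inr (Or.inr (Or.inr (Or.inl ht)))))⟩
      · exact ⟨"~=", by simp, by
          rw [PySem.Str.find_eq]
          exact pvFind_eq_of _ _ i h (hmin' _ (fun t ht => Or.inr (Or.inr (Or.inr (Or.inr ht)))))⟩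
    obtain ⟨op, hop, hfop⟩ := hwit
    obtain ⟨v, hv, hvle⟩ := pvFold_le _ line (i : Int) none
      (Or.inl ⟨op, hop, by rw [hfop]; omega, le_of_eq hfop⟩)
    have hvge := pvFold_ge _ line (i : Int) none hops (by simp) v hv
    rw [Option.map_some, hv]
    congr 1
    exact le_antisymm hvle hvge

-- ===== VERDICT (by name: the statement is the Claim_ definition above) =====
theorem split_packname_and_cons_spec : Claim_equal_split_packname_and_cons := by
  intro line _
  show split_packname_and_cons line = split_packname_and_cons_alt line
  simp only [split_packname_and_cons, split_packname_and_cons_alt]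
  rw [pvMin_eq_scan]
  cases pvScanOp line.toList 0 <;> rfl
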